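-- pv_equiv track=rewrite | github.com/hnolCol/instantclue | src/modules/dialogs/findAndReplace.py | get_unique_changes_from_column_dict
-- ===== SOURCE A (Python) =====
-- def get_unique_changes_from_column_dict(replaceDict):
-- 	'''
-- 	'''
-- 	keyList = []
--
-- 	for key,item in replaceDict.items():
-- 		if key == item:
-- 			keyList.append(key)
--
-- 	for key in keyList:
-- 		del replaceDict[key]
--
-- 	return replaceDict
-- ===== SOURCE B (Python) =====
-- def get_unique_changes_from_column_dict(replaceDict):
--     while True:
--         bad = next((k for k, v in replaceDict.items() if k == v), None)
--         if bad is None: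
--             return replaceDict
--         del replaceDict[bad]
-- ===== Notes on version B (the rewrite author's own statement) =====
-- stated objective: alternative
-- what changed: Replaces A's single-pass collect-keys-then-delete (two staged loops with an auxiliary key list) with a fixed-point worklist loop that repeatedly scans for the first key equal to its value and deletes it, restarting until no such entry remains; no auxiliary list is built.
import Mathlib
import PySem

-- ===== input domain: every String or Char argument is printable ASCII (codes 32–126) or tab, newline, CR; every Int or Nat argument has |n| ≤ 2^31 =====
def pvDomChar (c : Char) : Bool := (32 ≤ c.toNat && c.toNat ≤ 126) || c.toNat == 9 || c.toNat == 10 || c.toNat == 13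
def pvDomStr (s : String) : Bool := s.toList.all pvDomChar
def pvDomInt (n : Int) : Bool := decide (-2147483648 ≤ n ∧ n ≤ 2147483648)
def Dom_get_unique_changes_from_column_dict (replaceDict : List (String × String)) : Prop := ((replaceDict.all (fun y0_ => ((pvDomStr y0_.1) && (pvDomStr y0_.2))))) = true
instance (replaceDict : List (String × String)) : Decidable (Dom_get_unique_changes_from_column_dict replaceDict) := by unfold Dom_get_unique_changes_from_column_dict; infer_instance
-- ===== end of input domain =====

-- B replaces A's collect-keys-then-delete staged loops with a fixed-point loop that repeatedly
-- deletes the first key equal to its value until none remains (objective: alternative, not faster).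
-- Both A and B mutate the argument dict in place in Python; equivalence is about the returned contents.


-- ===== PORT A =====
-- 'del replaceDict[key]' on the association list: remove the (unique) entry with that key.
-- Exact for keys that are present; both programs only delete keys read off the dict itself.
def pyDelKey : List (String × String) → String → List (String × String)
  | [], _ => []
  | p :: rest, k => if p.1 = k then rest else p :: pyDelKey rest k

def get_unique_changes_from_column_dict (replaceDict : List (String × String)) : List (String × String) :=
  let keyList := replaceDict.foldl (fun acc p => if p.1 = p.2 then acc ++ [p.1] else acc) ([] : List String)
  keyList.foldl (fun d k => pyDelKey d k) replaceDict

-- ===== PORT B =====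
-- next((k for k, v in replaceDict.items() if k == v), None): first key equal to its value.
def pyFindBad : List (String × String) → Option String
  | [] => none
  | p :: rest => if p.1 = p.2 then some p.1 else pyFindBad rest

-- termination measure for the while-loop: each deletion shortens the dict
theorem pyDelKey_length_lt : ∀ (d : List (String × String)) (k : String),
    pyFindBad d = some k → (pyDelKey d k).length < d.length := by
  intro d
  induction d with
  | nil => intro k h; simp [pyFindBad] at h
  | cons p rest ih =>
    intro k h
    by_cases hp : p.1 = p.2
    · simp only [pyFindBad, if_pos hp, Option.some.injEq] at h
      simp [pyDelKey, h]
    · simp [pyFindBad, hp] at h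
      by_cases hk : p.1 = k
      · simp [pyDelKey, hk]
      · simp only [pyDelKey, if_neg hk, List.length_cons]
        exact Nat.succ_lt_succ (ih k h)

-- the while-loop of B: scan for the first diagonal entry, delete it, restart
def altLoop (d : List (String × String)) : List (String × String) :=
  match h : pyFindBad d with
  | none => d
  | some k => altLoop (pyDelKey d k)
termination_by d.length
decreasing_by exact pyDelKey_length_lt _ _ h

def get_unique_changes_from_column_dict_alt (replaceDict : List (String × String)) : List (String × String) :=
  altLoop replaceDict

-- ===== PRECONDITION & SPEC =====
-- The argument is a Python dict: its keys are unique. Pre_ only states that the association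
-- list is a valid dict representation; it excludes no Python-representable input.
def Pre_get_unique_changes_from_column_dict (replaceDict : List (String × String)) : Prop :=
  (replaceDict.map Prod.fst).Nodup
instance (replaceDict : List (String × String)) : Decidable (Pre_get_unique_changes_from_column_dict replaceDict) := by unfold Pre_get_unique_changes_from_column_dict; infer_instance

def pvWitness_get_unique_changes_from_column_dict : (List (String × String)) := [("a", "a"), ("b", "c")]

def Spec_get_unique_changes_from_column_dict (replaceDict : List (String × String)) (out : List (String × String)) : Prop := out = get_unique_changes_from_column_dict_alt replaceDict
instance (replaceDict : List (String × String)) (out : List (String × String)) : Decidable (Spec_get_unique_changes_from_column_dict replaceDict out) := by unfold Spec_get_unique_changes_from_column_dict; infer_instance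

-- ===== CLAIM (what is proved, stated in full; the proofs are below) =====
def Claim_equal_get_unique_changes_from_column_dict : Prop := ∀ (replaceDict : List (String × String)), Dom_get_unique_changes_from_column_dict replaceDict → Pre_get_unique_changes_from_column_dict replaceDict → Spec_get_unique_changes_from_column_dict replaceDict (get_unique_changes_from_column_dict replaceDict)

-- ===== LEMMAS AND PROOFS =====

-- A's first loop: the collected key list is the keys of the diagonal entries.
theorem diag_foldl (l : List (String × String)) (acc : List String) :
    l.foldl (fun acc p => if p.1 = p.2 then acc ++ [p.1] else acc) acc
      = acc ++ (l.filter (fun p => p.1 == p.2)).map Prod.fst := by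
  induction l generalizing acc with
  | nil => simp
  | cons p rest ih =>
    by_cases h : p.1 = p.2 <;> simp [List.foldl_cons, h, ih]

-- Deleting keys that are all different from p.1 keeps p at the front.
theorem foldl_del_not_mem (ks : List String) (p : String × String)
    (l : List (String × String)) (h : p.1 ∉ ks) :
    ks.foldl (fun d k => pyDelKey d k) (p :: l) = p :: ks.foldl (fun d k => pyDelKey d k) l := by
  induction ks generalizing l with
  | nil => rfl
  | cons k ks ih =>
    simp only [List.mem_cons, not_or] at h
    simp only [List.foldl_cons, pyDelKey, if_neg h.1]
    exact ih _ h.2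

-- A's result characterised: deleting the diagonal keys from a nodup-key list filters out the diagonal.
theorem del_diag_eq_filter (l : List (String × String))
    (hnd : (l.map Prod.fst).Nodup) :
    ((l.filter (fun p => p.1 == p.2)).map Prod.fst).foldl (fun d k => pyDelKey d k) l
      = l.filter (fun p => decide (p.1 ≠ p.2)) := by
  induction l with
  | nil => rfl
  | cons p rest ih =>
    rw [List.map_cons, List.nodup_cons] at hnd
    by_cases h : p.1 = p.2
    · have hfilter : (p :: rest).filter (fun p => p.1 == p.2)
          = p :: rest.filter (fun p => p.1 == p.2) := by simp [h]
      rw [hfilter, List.map_cons, List.foldl_cons]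
      have hdel : pyDelKey (p :: rest) p.1 = rest := by simp [pyDelKey]
      rw [hdel, ih hnd.2]
      simp [h]
    · have hfilter : (p :: rest).filter (fun p => p.1 == p.2)
          = rest.filter (fun p => p.1 == p.2) := by
        simp [h]
      rw [hfilter]
      have hnotmem : p.1 ∉ (rest.filter (fun p => p.1 == p.2)).map Prod.fst := by
        intro hmem
        exact hnd.1 (List.map_subset Prod.fst (fun x hx => List.mem_of_mem_filter hx) hmem)
      rw [foldl_del_not_mem _ _ _ hnotmem, ih hnd.2]
      simp [h]

-- If the scan finds nothing, no entry is diagonal, so the filter keeps everything.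
theorem findBad_none_filter (l : List (String × String)) (h : pyFindBad l = none) :
    l.filter (fun p => decide (p.1 ≠ p.2)) = l := by
  induction l with
  | nil => rfl
  | cons p rest ih =>
    by_cases hp : p.1 = p.2
    · simp [pyFindBad, hp] at h
    · simp [pyFindBad, hp] at h
      rw [List.filter_cons_of_pos (by simp [hp]), ih h]

-- The key found by the scan is a key of the list.
theorem findBad_mem_keys (l : List (String × String)) (k : String)
    (h : pyFindBad l = some k) : k ∈ l.map Prod.fst := by
  induction l with
  | nil => simp [pyFindBad] at h
  | cons p rest ih =>
    by_cases hp : p.1 = p.2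
    · simp only [pyFindBad, if_pos hp, Option.some.injEq] at h
      subst h; simp
    · simp [pyFindBad, hp] at h
      exact List.mem_cons_of_mem _ (ih h)

-- membership in pyDelKey implies membership in the original list
theorem pyDelKey_subset (l : List (String × String)) (k : String) :
    pyDelKey l k ⊆ l := by
  induction l with
  | nil => simp [pyDelKey]
  | cons q qs ihq =>
    intro x hx
    by_cases hq : q.1 = k
    · simp only [pyDelKey, if_pos hq] at hx; exact List.mem_cons_of_mem _ hx
    · simp only [pyDelKey, if_neg hq, List.mem_cons] at hx
      rcases hx with hx | hx
      · simp [hx]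
      · exact List.mem_cons_of_mem _ (ihq hx)

-- One deletion step: keys stay nodup and the filtered survivors are unchanged.
theorem delStep (l : List (String × String)) (k : String)
    (hnd : (l.map Prod.fst).Nodup) (h : pyFindBad l = some k) :
    ((pyDelKey l k).map Prod.fst).Nodup ∧
      (pyDelKey l k).filter (fun p => decide (p.1 ≠ p.2))
        = l.filter (fun p => decide (p.1 ≠ p.2)) := by
  induction l with
  | nil => simp [pyFindBad] at h
  | cons p rest ih =>
    rw [List.map_cons, List.nodup_cons] at hnd
    by_cases hp : p.1 = p.2
    · simp only [pyFindBad, if_pos hp, Option.some.injEq] at h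
      subst h
      constructor
      · simpa [pyDelKey] using hnd.2
      · simp [pyDelKey, hp]
    · simp [pyFindBad, hp] at h
      have hk : p.1 ≠ k := fun he => hnd.1 (he ▸ findBad_mem_keys rest k h)
      have := ih hnd.2 h
      constructor
      · simp only [pyDelKey, if_neg hk, List.map_cons, List.nodup_cons]
        exact ⟨fun hm => hnd.1 (List.map_subset Prod.fst (pyDelKey_subset rest k) hm), this.1⟩
      · simp only [pyDelKey, if_neg hk, List.filter_cons, decide_eq_true_eq, this.2]

-- B's loop characterised: on nodup keys it computes the diagonal-free filter.
theorem altLoop_eq_filter (l : List (String × String))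
    (hnd : (l.map Prod.fst).Nodup) :
    altLoop l = l.filter (fun p => decide (p.1 ≠ p.2)) := by
  induction hn : l.length using Nat.strong_induction_on generalizing l with
  | _ n ih =>
    rw [altLoop]
    split
    · next h => exact (findBad_none_filter l h).symm
    · next k h =>
      have hs := delStep l k hnd h
      have hlt := pyDelKey_length_lt l k h
      rw [ih (pyDelKey l k).length (hn ▸ hlt) (pyDelKey l k) hs.1 rfl, hs.2]

-- ===== VERDICT (by name: the statement is the Claim_ definition above) =====
theorem get_unique_changes_from_column_dict_spec : Claim_equal_get_unique_changes_from_column_dict := by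
  intro replaceDict _hdom hpre
  unfold Spec_get_unique_changes_from_column_dict
  unfold get_unique_changes_from_column_dict get_unique_changes_from_column_dict_alt
  rw [diag_foldl replaceDict [], List.nil_append, altLoop_eq_filter replaceDict hpre]
  exact del_diag_eq_filter replaceDict hpre
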